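-- pv_equiv track=rewrite | github.com/sekhari/gaussian-watermarking | src/corrupt_detect_watermarks.py | _add_tokens_at_indices
-- ===== SOURCE A (Python) =====
-- def _sanitize_token_list(token_list):
--     return [int(token) for token in token_list]
--
-- def _add_tokens_at_indices(token_list, add_tokens, indices):
--     token_list = _sanitize_token_list(token_list)
--     out = []
--     counter = 0
--     for i in range(len(token_list)):
--         if i in indices:
--             out.append(add_tokens[counter])
--             counter += 1
--         out.append(token_list[i])
--
--     return out
-- ===== SOURCE B (Python) =====
-- def _add_tokens_at_indices(token_list, add_tokens, indices):
--     token_list = [int(token) for token in token_list]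
--     n = len(token_list)
--     matched = sorted({i for i in indices if 0 <= i < n})
--     out = []
--     prev = 0
--     counter = 0
--     for p in matched:
--         out.extend(token_list[prev:p])
--         out.append(add_tokens[counter])
--         counter += 1
--         out.append(token_list[p])
--         prev = p + 1
--     out.extend(token_list[prev:])
--     return out
-- ===== Notes on version B (the rewrite author's own statement) =====
-- stated objective: alternative
-- what changed: Instead of scanning every position and testing 'i in indices' per element, B computes the sorted set of in-range insertion positions once and builds the result by copying untouched slices between consecutive insertion points.
import Mathlib
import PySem

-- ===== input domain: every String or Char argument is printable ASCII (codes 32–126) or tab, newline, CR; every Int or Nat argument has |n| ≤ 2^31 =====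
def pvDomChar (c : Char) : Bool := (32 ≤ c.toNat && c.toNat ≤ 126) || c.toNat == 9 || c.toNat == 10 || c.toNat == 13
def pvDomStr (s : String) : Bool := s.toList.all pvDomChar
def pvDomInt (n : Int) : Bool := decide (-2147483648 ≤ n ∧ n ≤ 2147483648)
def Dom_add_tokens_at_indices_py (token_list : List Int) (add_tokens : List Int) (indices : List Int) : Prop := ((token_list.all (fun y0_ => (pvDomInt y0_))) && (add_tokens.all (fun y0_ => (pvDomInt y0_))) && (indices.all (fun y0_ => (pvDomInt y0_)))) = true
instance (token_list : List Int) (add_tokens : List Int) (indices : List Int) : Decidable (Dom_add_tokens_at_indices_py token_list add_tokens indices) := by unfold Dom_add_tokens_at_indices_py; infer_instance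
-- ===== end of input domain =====

-- B replaces A's per-position membership scan by one sorted set of in-range insertion
-- positions plus slice copies between them (objective: alternative decomposition).


-- ===== PORT A =====
-- _sanitize_token_list: int(token) is the identity on ints, kept as the map it is.
-- add_tokens[counter] is pyGetD with default 0: Pre_ keeps counter in range wherever
-- Python returns (Python raises IndexError exactly on the inputs Pre_ excludes).
def add_tokens_at_indices_py (token_list : List Int) (add_tokens : List Int) (indices : List Int) : List Int :=
  let tl := token_list.map (fun token => token)
  ((PySem.List.pyRange 0 (PySem.List.len tl) 1).foldl
    (fun (s : List Int × Int) i =>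
      if i ∈ indices then
        ((s.1 ++ [PySem.List.pyGetD add_tokens s.2 0]) ++ [PySem.List.pyGetD tl i 0], s.2 + 1)
      else (s.1 ++ [PySem.List.pyGetD tl i 0], s.2))
    ([], 0)).1

-- ===== PORT B =====
-- matched = sorted({i for i in indices if 0 <= i < n}); then slice copies between the
-- insertion points, with a running prev and counter (see Source B).
def add_tokens_at_indices_py_alt (token_list : List Int) (add_tokens : List Int) (indices : List Int) : List Int :=
  let tl := token_list.map (fun token => token)
  let n := PySem.List.len tl
  let matched := PySem.List.sorted
    (PySem.Set.ofList (indices.filter (fun i => decide (0 ≤ i ∧ i < n)))) (fun x => x)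
  let s := matched.foldl
    (fun (s : List Int × Int × Int) p =>
      (((s.1 ++ PySem.List.slice tl (some s.2.1) (some p)) ++ [PySem.List.pyGetD add_tokens s.2.2 0])
         ++ [PySem.List.pyGetD tl p 0], p + 1, s.2.2 + 1))
    ([], 0, 0)
  s.1 ++ PySem.List.slice tl (some s.2.1) none

-- ===== PRECONDITION & SPEC =====
-- Pre_ excludes exactly the inputs on which BOTH Pythons raise IndexError: more
-- distinct in-range insertion positions than add_tokens has elements.
def Pre_add_tokens_at_indices_py (token_list : List Int) (add_tokens : List Int) (indices : List Int) : Prop :=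
  ((List.range token_list.length).filter (fun k : Nat => decide ((k : Int) ∈ indices))).length ≤ add_tokens.length
instance (token_list : List Int) (add_tokens : List Int) (indices : List Int) : Decidable (Pre_add_tokens_at_indices_py token_list add_tokens indices) := by unfold Pre_add_tokens_at_indices_py; infer_instance

def pvWitness_add_tokens_at_indices_py : List Int × List Int × List Int := ([5, 6], [100], [1])

def Spec_add_tokens_at_indices_py (token_list : List Int) (add_tokens : List Int) (indices : List Int) (out : List Int) : Prop := out = add_tokens_at_indices_py_alt token_list add_tokens indices
instance (token_list : List Int) (add_tokens : List Int) (indices : List Int) (out : List Int) : Decidable (Spec_add_tokens_at_indices_py token_list add_tokens indices out) := by unfold Spec_add_tokens_at_indices_py; infer_instance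

-- ===== CLAIM (what is proved, stated in full; the proofs are below) =====
def Claim_equal_add_tokens_at_indices_py : Prop := ∀ (token_list : List Int) (add_tokens : List Int) (indices : List Int), Dom_add_tokens_at_indices_py token_list add_tokens indices → Pre_add_tokens_at_indices_py token_list add_tokens indices → Spec_add_tokens_at_indices_py token_list add_tokens indices (add_tokens_at_indices_py token_list add_tokens indices)

-- ===== LEMMAS AND PROOFS =====

-- Result of A's loop on the (Nat) positions Kn, counter c.
def pvBuildA (tl at_ idx : List Int) : List Nat → Nat → List Int
  | [], _ => []
  | i :: is, c =>
    if (i : Int) ∈ idx then at_.getD c 0 :: tl.getD i 0 :: pvBuildA tl at_ idx is (c + 1)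
    else tl.getD i 0 :: pvBuildA tl at_ idx is c

-- Result of B's loop on the (Nat) insertion positions, from offset prev, counter c.
def pvBuildB (tl at_ : List Int) : List Nat → Nat → Nat → List Int
  | [], prev, _ => tl.drop prev
  | p :: ps, prev, c =>
    (tl.drop prev).take (p - prev) ++ at_.getD c 0 :: tl.getD p 0 :: pvBuildB tl at_ ps (p + 1) (c + 1)

theorem pvA_fold (tl at_ idx : List Int) (Kn : List Nat) (acc : List Int) (c : Nat) :
    ((Kn.map (fun k : Nat => (k : Int))).foldl
      (fun (s : List Int × Int) i =>
        if i ∈ idx then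
          ((s.1 ++ [PySem.List.pyGetD at_ s.2 0]) ++ [PySem.List.pyGetD tl i 0], s.2 + 1)
        else (s.1 ++ [PySem.List.pyGetD tl i 0], s.2))
      (acc, (c : Int))).1 = acc ++ pvBuildA tl at_ idx Kn c := by
  induction Kn generalizing acc c with
  | nil => simp [pvBuildA]
  | cons i is ih =>
    by_cases h : (i : Int) ∈ idx
    · have hc : ((c : Int) + 1) = ((c + 1 : Nat) : Int) := by push_cast; ring
      simp only [List.map_cons, List.foldl_cons, if_pos h, hc, PySem.List.pyGetD_natCast, ih]
      simp [pvBuildA, h]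
    · simp only [List.map_cons, List.foldl_cons, if_neg h, PySem.List.pyGetD_natCast, ih]
      simp [pvBuildA, h]

theorem pvB_fold (tl at_ : List Int) (Mn : List Nat) (acc : List Int) (prev c : Nat) :
    (let r := (Mn.map (fun k : Nat => (k : Int))).foldl
      (fun (s : List Int × Int × Int) p =>
        (((s.1 ++ PySem.List.slice tl (some s.2.1) (some p)) ++ [PySem.List.pyGetD at_ s.2.2 0])
           ++ [PySem.List.pyGetD tl p 0], p + 1, s.2.2 + 1))
      (acc, (prev : Int), (c : Int))
     r.1 ++ PySem.List.slice tl (some r.2.1) none) = acc ++ pvBuildB tl at_ Mn prev c := by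
  induction Mn generalizing acc prev c with
  | nil => simp [pvBuildB, PySem.List.slice_from_natCast]
  | cons p ps ih =>
    have hp : ((p : Int) + 1) = ((p + 1 : Nat) : Int) := by push_cast; ring
    have hc : ((c : Int) + 1) = ((c + 1 : Nat) : Int) := by push_cast; ring
    simp only [List.map_cons, List.foldl_cons, hp, hc, PySem.List.pyGetD_natCast,
      PySem.List.slice_natCast, ih]
    simp [pvBuildB]

-- When every insertion position is past prev and prev is in range, the first token
-- of the remaining span peels off the front of pvBuildB.
theorem pvB_skip (tl at_ : List Int) (L : List Nat) (prev c : Nat)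
    (hprev : prev < tl.length) (hL : ∀ p ∈ L, prev + 1 ≤ p) :
    pvBuildB tl at_ L prev c = tl.getD prev 0 :: pvBuildB tl at_ L (prev + 1) c := by
  cases L with
  | nil =>
    simp only [pvBuildB]
    rw [List.drop_eq_getElem_cons hprev, List.getD_eq_getElem tl 0 hprev]
  | cons p ps =>
    have hp : prev + 1 ≤ p := hL p (List.mem_cons_self ..)
    simp only [pvBuildB]
    rw [List.drop_eq_getElem_cons hprev, List.getD_eq_getElem tl 0 hprev]
    have h1 : p - prev = (p - (prev + 1)) + 1 := by omega
    rw [h1, List.take_succ_cons]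
    simp

theorem pvBridge (tl at_ idx : List Int) (m prev c : Nat) (h : prev + m = tl.length) :
    pvBuildA tl at_ idx (List.range' prev m) c
      = pvBuildB tl at_ ((List.range' prev m).filter (fun k : Nat => decide ((k : Int) ∈ idx))) prev c := by
  induction m generalizing prev c with
  | zero =>
    simp [pvBuildA, pvBuildB, List.drop_eq_nil_of_le (by omega : tl.length ≤ prev)]
  | succ m ih =>
    rw [List.range'_succ]
    by_cases hp : (prev : Int) ∈ idx
    · rw [List.filter_cons_of_pos (by simpa using hp)]
      simp only [pvBuildA, if_pos hp, pvBuildB, Nat.sub_self, List.take_zero, List.nil_append]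
      rw [ih (prev + 1) (c + 1) (by omega)]
    · rw [List.filter_cons_of_neg (by simpa using hp)]
      simp only [pvBuildA, if_neg hp]
      rw [ih (prev + 1) c (by omega)]
      rw [pvB_skip tl at_ _ prev c (by omega)
        (fun p hpmem => by
          have := List.mem_range'_1.mp (List.mem_of_mem_filter hpmem); omega)]

theorem pvMatched (n : Nat) (idx : List Int) :
    PySem.List.sorted (PySem.Set.ofList (idx.filter (fun i => decide (0 ≤ i ∧ i < (n : Int))))) (fun x => x)
      = ((List.range n).filter (fun k : Nat => decide ((k : Int) ∈ idx))).map (fun k : Nat => (k : Int)) := by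
  apply PySem.List.sorted_eq_of_perm_of_pairwise_lt
  · apply (List.perm_ext_iff_of_nodup ?_ (PySem.Set.nodup_ofList _)).mpr
    · intro x
      simp only [List.mem_map, List.mem_filter, List.mem_range, PySem.Set.mem_ofList,
        decide_eq_true_eq]
      constructor
      · rintro ⟨k, ⟨hk, hmem⟩, rfl⟩; exact ⟨hmem, by omega, by exact_mod_cast hk⟩
      · rintro ⟨hmem, h0, hn⟩
        refine ⟨x.toNat, ⟨by omega, ?_⟩, by omega⟩
        have : ((x.toNat : Int)) = x := by omega
        rw [this]; exact hmem
    · exact ((List.nodup_range).filter _).map (fun a b => by exact_mod_cast id)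
  · refine List.pairwise_map.mpr ?_
    exact ((List.pairwise_lt_range).filter _).imp (by intro a b hab; exact_mod_cast hab)

-- ===== VERDICT (by name: the statement is the Claim_ definition above) =====
theorem add_tokens_at_indices_py_spec : Claim_equal_add_tokens_at_indices_py := by
  intro tl at_ idx _dom _pre
  unfold Spec_add_tokens_at_indices_py add_tokens_at_indices_py add_tokens_at_indices_py_alt
  simp only [List.map_id', PySem.List.len_eq, PySem.List.pyRange_zero_nat, pvMatched]
  have hA := pvA_fold tl at_ idx (List.range tl.length) [] 0
  have hB := pvB_fold tl at_ ((List.range tl.length).filter (fun k : Nat => decide ((k : Int) ∈ idx))) [] 0 0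
  simp only [Nat.cast_zero] at hA hB
  rw [hA, hB]
  rw [List.range_eq_range', pvBridge tl at_ idx tl.length 0 0 (by omega)]
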